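-- pv_equiv track=rewrite | github.com/NeiderSR/cifrados-clasicos | src/monoalfabetico.py | inverso
-- ===== SOURCE A (Python) =====
-- def congruente_mod26(a):
--     '''Obtiene el valor al que el número especificado sea congruente, modulo
--     26.
--
--     :param a: un entero al que se obtendrá su congruencia, módulo 26.
--     :returns: el entero x que satisface la congruencia a = x (mod 26). '''
--
--     if 0 <= a and a < 26:
--         return a
--     elif a >= 26:
--         return a - (26 * (a // 26))
--     else:
--         val = a
--         while val < 0:
--             val += 26
--         return val
--
-- def maximo_comun_divisor(a, b):
--     '''Devuelve el máximo común divisor de los valores especificados usando el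
--     algoritmo de Euclides de manera recursiva.
--
--     :param a: el primer valor para calcular el MCD.
--     :param a: el segundo valor para calcular el MCD.
--     :returns: el MCD entre a y b.'''
--
--     if a == 0:
--         return b
--     elif b == 0:
--         return a
--     elif b > a:
--         return maximo_comun_divisor(b, a)
--     else:
--         return maximo_comun_divisor(b, a - (b * (a // b)))
--
-- def inverso(a):
--     '''Obtiene el inverso multiplicativo del valor especificado, módulo 26.
--
--     :param a: el valor para el que se busca el inverso multiplicativo.
--     :returns: el inverso multiplicativo de a, módulo 26.'''
--
--     if maximo_comun_divisor(a, 26) == 1: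
--         for i in range(0, 26):
--             val = congruente_mod26(a * i)
--             if val == 1:
--                 return i
--         raise Exception('No se pudo encontrar el inverso. Si estás viendo esto, algo muy raro pasó. D:')
--     else:
--          raise Exception('El valor no tiene inverso módulo 26.')
-- ===== SOURCE B (Python) =====
-- def inverso(a):
--     '''Inverso multiplicativo de a módulo 26 vía algoritmo de Euclides
--     extendido sobre (a mod 26, 26), una sola pasada con coeficientes de
--     Bézout en lugar de gcd recursivo + búsqueda 0..25.'''
--     r0, r1 = a % 26, 26
--     x0, x1 = 1, 0
--     while r1 != 0:
--         q = r0 // r1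
--         r0, r1 = r1, r0 - q * r1
--         x0, x1 = x1, x0 - q * x1
--     if r0 != 1:
--         raise Exception('El valor no tiene inverso módulo 26.')
--     return x0 % 26
-- ===== Notes on version B (the rewrite author's own statement) =====
-- stated objective: simpler
-- what changed: Replaced the recursive gcd helper plus the 0..25 trial-multiplication search by a single extended-Euclidean loop over (a mod 26, 26) that tracks Bezout coefficients and normalizes the coefficient into 0..25.
-- crash fix: On non-positive a coprime to 26, A raises (a RecursionError from its recursive gcd on most such inputs, otherwise its own Exception because that gcd returns a negative value) while B returns the inverse of a mod 26. — e.g. on inverso(-1): A raises Exception, B returns 25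
import Mathlib
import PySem

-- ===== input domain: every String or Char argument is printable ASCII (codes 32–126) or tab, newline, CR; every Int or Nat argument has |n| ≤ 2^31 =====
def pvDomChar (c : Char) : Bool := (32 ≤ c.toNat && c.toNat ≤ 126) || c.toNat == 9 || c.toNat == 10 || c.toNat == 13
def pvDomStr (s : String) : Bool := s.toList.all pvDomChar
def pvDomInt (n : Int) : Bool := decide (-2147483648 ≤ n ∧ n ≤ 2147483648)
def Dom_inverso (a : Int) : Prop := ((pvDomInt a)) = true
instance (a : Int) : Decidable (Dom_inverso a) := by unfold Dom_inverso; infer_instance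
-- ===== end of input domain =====

-- B replaces A's recursive gcd + 0..25 trial search by a single extended-Euclid
-- loop over (a mod 26, 26) tracking Bézout coefficients (objective: simpler).

-- ===== PORT A =====
-- while val < 0: val += 26  (the negative branch of congruente_mod26)
def congNegLoop (val : Int) : Int :=
  if val < 0 then congNegLoop (val + 26) else val
termination_by (-val).toNat
decreasing_by omega

def congruente_mod26 (a : Int) : Int :=
  if 0 ≤ a ∧ a < 26 then a
  else if a ≥ 26 then a - 26 * (PySem.Int.floordiv a 26)
  else congNegLoop a

-- A's recursive Euclid; fuel only makes the (possibly divergent) recursion total,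
-- 100 is enough on every input Pre_ admits (proved below).
def mcd (fuel : Nat) (a b : Int) : Int :=
  match fuel with
  | 0 => 0
  | fuel + 1 =>
    if a = 0 then b
    else if b = 0 then a
    else if b > a then mcd fuel b a
    else mcd fuel b (a - b * PySem.Int.floordiv a b)

def inverso (a : Int) : Int :=
  if mcd 100 a 26 = 1 then
    match (PySem.List.pyRange 0 26 1).find? (fun i => congruente_mod26 (a * i) == 1) with
    | some i => i
    | none => 0       -- Python raises here ('algo muy raro'); outside Pre_
  else 0              -- Python raises Exception; outside Pre_

-- ===== PORT B =====
-- the while loop of Source B: extended Euclid, returns final (r0, x0)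
def euclidLoop (fuel : Nat) (r0 r1 x0 x1 : Int) : Int × Int :=
  match fuel with
  | 0 => (r0, x0)
  | fuel + 1 =>
    if r1 ≠ 0 then
      let q := PySem.Int.floordiv r0 r1
      euclidLoop fuel r1 (r0 - q * r1) x1 (x0 - q * x1)
    else (r0, x0)

def inverso_alt (a : Int) : Int :=
  let p := euclidLoop 100 (PySem.Int.mod a 26) 26 1 0
  if p.1 ≠ 1 then 0   -- Python raises Exception; outside Pre_
  else PySem.Int.mod p.2 26

-- ===== PRECONDITION & SPEC =====
-- A returns a value exactly on positive a coprime to 26; everywhere else it raises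
-- (Exception, or RecursionError of its recursive gcd on most negative a).
def Pre_inverso (a : Int) : Prop := 0 < a ∧ Int.gcd a 26 = 1
instance (a : Int) : Decidable (Pre_inverso a) := by unfold Pre_inverso; infer_instance
def pvWitness_inverso : Int := (3)

-- On non-positive a coprime to 26, A raises (RecursionError of its recursive gcd,
-- otherwise its Exception) while B returns the inverse of a mod 26.
def Raises_inverso (a : Int) : Prop := a ≤ 0 ∧ Int.gcd a 26 = 1
instance (a : Int) : Decidable (Raises_inverso a) := by unfold Raises_inverso; infer_instance
def pvRaiseWitness_inverso : Int := (-1)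
def pvRaiseWitnessOut_inverso : Int := 25

def Spec_inverso (a : Int) (out : Int) : Prop := out = inverso_alt a
instance (a : Int) (out : Int) : Decidable (Spec_inverso a out) := by unfold Spec_inverso; infer_instance

-- ===== CLAIM (what is proved, stated in full; the proofs are below) =====
def Claim_equal_inverso : Prop := ∀ (a : Int), Dom_inverso a → Pre_inverso a → Spec_inverso a (inverso a)
def Claim_raises_inverso : Prop := (∀ (a : Int), Dom_inverso a → Raises_inverso a → ¬ Pre_inverso a) ∧ (Dom_inverso (pvRaiseWitness_inverso) ∧ Raises_inverso (pvRaiseWitness_inverso) ∧ inverso_alt (pvRaiseWitness_inverso) = pvRaiseWitnessOut_inverso)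

-- ===== LEMMAS AND PROOFS =====

-- A's congruente_mod26 on nonnegative input is emod 26
lemma cong_nonneg (x : Int) (hx : 0 ≤ x) : congruente_mod26 x = x % 26 := by
  unfold congruente_mod26
  split_ifs with h1 h2
  · omega
  · rw [PySem.Int.floordiv_eq_ediv_of_pos (by norm_num)]
    omega
  · omega

-- A's gcd computes Int.gcd when 0 ≤ b ≤ a and fuel exceeds b
lemma mcd_correct : ∀ (fuel : Nat) (a b : Int), 0 ≤ b → b ≤ a → b.toNat + 1 ≤ fuel →
    mcd fuel a b = (Int.gcd a b : Int) := by
  intro fuel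
  induction fuel with
  | zero => intro a b _ _ h; omega
  | succ n ih =>
    intro a b hb hba hf
    unfold mcd
    split_ifs with h1 h2 h3
    · subst h1
      have : b = 0 := by omega
      subst this; simp
    · subst h2
      rw [Int.gcd_zero_right]
      exact (Int.natAbs_of_nonneg (by omega)).symm
    · omega
    · have hbpos : 0 < b := by omega
      have hmod : a - b * PySem.Int.floordiv a b = a % b := by
        rw [PySem.Int.floordiv_eq_ediv_of_pos hbpos]
        have := Int.emod_emod_of_dvd a (dvd_refl b)
        have := Int.mul_ediv_add_emod a b
        omega
      rw [hmod, ih b (a % b) (Int.emod_nonneg a (by omega)) (le_of_lt (Int.emod_lt_of_pos a hbpos))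
        (by have := Int.emod_lt_of_pos a hbpos; have := Int.emod_nonneg a (show b ≠ 0 by omega); omega)]
      congr 1
      rw [Int.gcd_comm b (a % b), Int.gcd_emod a b]

-- entry: for positive a, A's gcd call equals Int.gcd a 26
lemma mcd_entry (a : Int) (ha : 0 < a) : mcd 100 a 26 = (Int.gcd a 26 : Int) := by
  by_cases h : 26 ≤ a
  · exact mcd_correct 100 a 26 (by norm_num) h (by norm_num)
  · show mcd 100 a 26 = _
    unfold mcd
    split_ifs with h1 h2 h3
    · omega
    · omega
    · rw [mcd_correct 99 26 a (by omega) (by omega) (by omega)]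
      rw [Int.gcd_comm]
    · omega

-- find? congruence
lemma find?_congr {α : Type} (l : List α) (p q : α → Bool) (h : ∀ x ∈ l, p x = q x) :
    l.find? p = l.find? q := by
  induction l with
  | nil => rfl
  | cons y ys ih =>
    simp only [List.find?]
    rw [h y (by simp)]
    cases q y
    · exact ih (fun x hx => h x (by simp [hx]))
    · rfl

-- A's search depends only on a % 26
def finishA (r : Int) : Int :=
  match (PySem.List.pyRange 0 26 1).find? (fun i => (r * i) % 26 == 1) with
  | some i => i
  | none => 0

lemma inverso_eq_finishA (a : Int) (h : Pre_inverso a) : inverso a = finishA (a % 26) := by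
  obtain ⟨ha, hg⟩ := h
  unfold inverso finishA
  rw [if_pos (by rw [mcd_entry a ha, hg]; rfl)]
  have hfind : (PySem.List.pyRange 0 26 1).find? (fun i => congruente_mod26 (a * i) == 1)
      = (PySem.List.pyRange 0 26 1).find? (fun i => ((a % 26) * i) % 26 == 1) := by
    apply find?_congr
    intro i hi
    have hi' : 0 ≤ i ∧ i < 26 := by
      have : PySem.List.pyRange 0 26 1 = [0,1,2,3,4,5,6,7,8,9,10,11,12,13,14,15,16,17,18,19,20,21,22,23,24,25] := by decide
      rw [this] at hi
      fin_cases hi <;> norm_num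
    rw [cong_nonneg (a * i) (mul_nonneg ha.le hi'.1)]
    have : (a * i) % 26 = ((a % 26) * i) % 26 := by
      rw [Int.mul_emod, Int.mul_emod (a % 26) i, Int.emod_emod_of_dvd a (dvd_refl 26)]
    rw [this]
  rw [hfind]

-- B depends only on a % 26
lemma alt_emod (a : Int) : inverso_alt a = inverso_alt (a % 26) := by
  unfold inverso_alt
  rw [PySem.Int.mod_eq_emod_of_pos (a := a % 26) (by norm_num),
      PySem.Int.mod_eq_emod_of_pos (a := a) (by norm_num), Int.emod_emod_of_dvd a (dvd_refl 26)]

-- the finite check: on residues coprime to 26 the two computations agree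
lemma residue_agree (r : Int) (h0 : 0 ≤ r) (h26 : r < 26) (hg : Int.gcd r 26 = 1) :
    finishA r = inverso_alt r := by
  interval_cases r <;> simp_all <;> decide

theorem inverso_spec' (a : Int) (h : Pre_inverso a) : inverso a = inverso_alt a := by
  have hg : Int.gcd (a % 26) 26 = Int.gcd a 26 := Int.gcd_emod a 26
  rw [inverso_eq_finishA a h, alt_emod a]
  exact residue_agree (a % 26) (Int.emod_nonneg a (by norm_num))
    (Int.emod_lt_of_pos a (by norm_num)) (hg.trans h.2)

-- ===== VERDICT (by name: the statement is the Claim_ definition above) =====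
theorem inverso_spec : Claim_equal_inverso := by
  intro a _ h
  exact inverso_spec' a h

@[simp] theorem inverso_raises : Claim_raises_inverso := by
  unfold Claim_raises_inverso
  refine ⟨?_, by decide⟩
  intro a _ hr hp
  exact absurd hp.1 (not_lt.mpr hr.1)
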